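-- pv_equiv track=rewrite | github.com/dYGamma/VuzUC | 7SEM/TVP/LAB5/mew.py | track_angle_bracket_levels
-- ===== SOURCE A (Python) =====
-- ANGLE_OPENING_BRACKETS = ['<']
--
-- ANGLE_CLOSING_BRACKETS = ['>']
--
-- def track_angle_bracket_levels(regex):
--     levels = [0] * len(regex)
--     bracket_counter = 0
--
--     for i, char in enumerate(regex):
--         if char in ANGLE_OPENING_BRACKETS:
--             bracket_counter += 1
--             levels[i] = bracket_counter
--         elif char in ANGLE_CLOSING_BRACKETS:
--             levels[i] = bracket_counter
--             bracket_counter -= 1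
--         else:
--             levels[i] = bracket_counter
--
--     return levels
-- ===== SOURCE B (Python) =====
-- from itertools import accumulate
--
-- def track_angle_bracket_levels(regex):
--     deltas = [1 if c == '<' else -1 if c == '>' else 0 for c in regex]
--     prefix = list(accumulate(deltas, initial=0))[:-1]
--     return [p + (1 if c == '<' else 0) for c, p in zip(regex, prefix)]
-- ===== Notes on version B (the rewrite author's own statement) =====
-- stated objective: alternative
-- what changed: Replaces the single branchy running-counter loop with a map-to-deltas + exclusive prefix-sum (itertools.accumulate) + zip-combine decomposition; levels[i] = prefix[i] plus 1 only for openers.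
import Mathlib
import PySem

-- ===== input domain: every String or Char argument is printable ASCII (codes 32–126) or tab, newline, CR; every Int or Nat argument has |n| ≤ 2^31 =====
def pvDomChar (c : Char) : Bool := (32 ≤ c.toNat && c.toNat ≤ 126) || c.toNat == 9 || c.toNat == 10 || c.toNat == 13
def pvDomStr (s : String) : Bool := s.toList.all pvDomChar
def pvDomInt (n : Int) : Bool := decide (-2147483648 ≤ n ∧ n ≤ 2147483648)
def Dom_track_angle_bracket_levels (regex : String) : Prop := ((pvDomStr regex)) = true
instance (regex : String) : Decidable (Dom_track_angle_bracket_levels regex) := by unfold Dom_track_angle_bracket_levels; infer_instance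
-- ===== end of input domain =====

-- B recomputes the same levels by a deltas/exclusive-prefix-sum/zip decomposition instead of A's branchy running counter (objective: alternative; return value only).
-- ===== PORT A =====
-- the loop body of A: running counter, one level per char, branch order as in the Python
def pvALoop : List Char → Int → List Int
  | [], _ => []
  | c :: rest, k =>
    if c = '<' then (k + 1) :: pvALoop rest (k + 1)
    else if c = '>' then k :: pvALoop rest (k - 1)
    else k :: pvALoop rest k

def track_angle_bracket_levels (regex : String) : List Int :=
  pvALoop regex.toList 0

-- ===== PORT B =====
def pvDelta (c : Char) : Int := if c = '<' then 1 else if c = '>' then -1 else 0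

def track_angle_bracket_levels_alt (regex : String) : List Int :=
  let cs := regex.toList
  let prefixFun := ((cs.map pvDelta).scanl (· + ·) 0).dropLast   -- exclusive prefix sums
  (cs.zip prefixFun).map (fun cp => cp.2 + (if cp.1 = '<' then 1 else 0))

-- ===== PRECONDITION & SPEC =====
def Spec_track_angle_bracket_levels (regex : String) (out : List Int) : Prop := out = track_angle_bracket_levels_alt regex
instance (regex : String) (out : List Int) : Decidable (Spec_track_angle_bracket_levels regex out) := by unfold Spec_track_angle_bracket_levels; infer_instance

-- ===== CLAIM (what is proved, stated in full; the proofs are below) =====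
def Claim_equal_track_angle_bracket_levels : Prop := ∀ (regex : String), Dom_track_angle_bracket_levels regex → Spec_track_angle_bracket_levels regex (track_angle_bracket_levels regex)

-- ===== LEMMAS AND PROOFS =====

-- ===== VERDICT (by name: the statement is the Claim_ definition above) =====
-- key lemma: A's loop from counter k equals B's combine over prefix sums seeded at k
theorem pvALoop_eq_prefix (cs : List Char) (k : Int) :
    pvALoop cs k =
      (cs.zip (((cs.map pvDelta).scanl (· + ·) k).dropLast)).map
        (fun cp => cp.2 + (if cp.1 = '<' then 1 else 0)) := by
  induction cs generalizing k with
  | nil => simp [pvALoop]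
  | cons c rest ih =>
    have hne : ((rest.map pvDelta).scanl (· + ·) (k + pvDelta c)) ≠ [] :=
      List.ne_nil_of_length_pos (by simp [List.length_scanl])
    rw [show ((c :: rest).map pvDelta) = pvDelta c :: rest.map pvDelta from rfl]
    rw [List.scanl_cons]
    rw [List.dropLast_cons_of_ne_nil hne]
    by_cases h1 : c = '<'
    · simp [pvALoop, h1, pvDelta, ih]
    · by_cases h2 : c = '>'
      · simp [pvALoop, h1, h2, pvDelta, ih, sub_eq_add_neg]
      · simp [pvALoop, h1, h2, pvDelta, ih]

theorem track_angle_bracket_levels_spec : Claim_equal_track_angle_bracket_levels := by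
  intro regex _
  unfold Spec_track_angle_bracket_levels track_angle_bracket_levels track_angle_bracket_levels_alt
  exact pvALoop_eq_prefix regex.toList 0
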